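-- pv_equiv track=rewrite | github.com/andwilley/pyalgos | dice.py | turn_dice
-- ===== SOURCE A (Python) =====
-- from collections import Counter
--
-- def turn_dice(dice_array):
--     face_up_count = Counter() # face down can be derived from this
--     # with this
--     recip = lambda x: 7 - x
--     # set all to 0 initially
--     for x in range(1, 7):
--         face_up_count[x] = 0
--     # count the occurances of each value
--     for die in dice_array:
--         face_up_count[die] += 1
--     ratio_to_recip = Counter()
--     # find the largest difference between a number and its recip
--     for x in range(1, 7):
--         ratio_to_recip[x] = face_up_count[x] - face_up_count[recip(x)]
--     # use the largest difference as the number to turn to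
--     turn_to = ratio_to_recip.most_common(1)[0]
--     turns = 0
--     # turn the dice, 2 if its the recip facing up, 1 if not the value, 0 if it matches the value
--     for die in dice_array:
--         if die == recip(turn_to[0]):
--             turns += 2
--         elif die != turn_to[0]:
--             turns += 1
--     return turns
-- ===== SOURCE B (Python) =====
-- def turn_dice(dice_array):
--     # try each target face and take the cheapest: 2 turns for an opposite face, 1 otherwise
--     return min(sum(2 if die == 7 - x else 1 for die in dice_array if die != x)
--                for x in range(1, 7))
-- ===== Notes on version B (the rewrite author's own statement) =====
-- stated objective: simpler
-- what changed: B drops A's Counters, count-difference key and most_common argmax entirely: it brute-forces the six candidate target faces, computes the turning cost of each directly from the dice, and returns the minimum cost (ties in A's argmax never affect the minimal value).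
import Mathlib
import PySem

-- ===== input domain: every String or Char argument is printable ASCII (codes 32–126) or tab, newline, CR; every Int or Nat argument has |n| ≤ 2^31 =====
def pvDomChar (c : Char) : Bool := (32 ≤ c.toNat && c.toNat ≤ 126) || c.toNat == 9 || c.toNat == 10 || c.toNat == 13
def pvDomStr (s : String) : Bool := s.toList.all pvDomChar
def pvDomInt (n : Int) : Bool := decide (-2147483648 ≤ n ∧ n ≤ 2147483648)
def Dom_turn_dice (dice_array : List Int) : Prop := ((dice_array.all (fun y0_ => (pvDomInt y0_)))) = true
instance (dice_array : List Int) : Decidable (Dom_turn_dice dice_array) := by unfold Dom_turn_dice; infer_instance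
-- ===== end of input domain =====

-- B replaces A's Counters / most_common argmax by a direct minimum over the six
-- candidate target faces' turning costs (objective: simpler).


-- ===== PORT A =====
-- face_up_count after the two initial loops (keys 1..6 set to 0, then each die counted)
def pvFace0 : PySem.Dict Int Int :=
  (PySem.List.pyRange 1 7 1).foldl (fun d x => d.insert x 0) PySem.Dict.empty
def pvFace (dice_array : List Int) : PySem.Dict Int Int :=
  dice_array.foldl (fun d die => d.modify die 0 (· + 1)) pvFace0
-- ratio_to_recip
def pvRatio (dice_array : List Int) : PySem.Dict Int Int :=
  (PySem.List.pyRange 1 7 1).foldl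
    (fun d x => d.insert x ((pvFace dice_array).getD x 0 - (pvFace dice_array).getD (7 - x) 0))
    PySem.Dict.empty
-- most_common(1)[0]: the first item of maximal count (heapq.nlargest keeps the earliest on ties,
-- which is PySem.List.max?'s first-extremal rule); the list of items is never empty here.
def pvTurnTo (dice_array : List Int) : Int × Int :=
  (PySem.List.max? (pvRatio dice_array).items (fun p => p.2)).getD (0, 0)
def turn_dice (dice_array : List Int) : Int :=
  dice_array.foldl
    (fun turns die =>
      if die = 7 - (pvTurnTo dice_array).1 then turns + 2
      else if die ≠ (pvTurnTo dice_array).1 then turns + 1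
      else turns) 0

-- ===== PORT B =====
-- sum(2 if die == 7 - x else 1 for die in dice_array if die != x)
def pvCost (dice_array : List Int) (x : Int) : Int :=
  dice_array.foldl
    (fun s die => if die ≠ x then s + (if die = 7 - x then 2 else 1) else s) 0
-- min(cost(x) for x in range(1, 7))  (never empty: six candidates)
def turn_dice_alt (dice_array : List Int) : Int :=
  (PySem.List.min? ((PySem.List.pyRange 1 7 1).map (pvCost dice_array)) (fun v => v)).getD 0

-- ===== PRECONDITION & SPEC =====
def Spec_turn_dice (dice_array : List Int) (out : Int) : Prop := out = turn_dice_alt dice_array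
instance (dice_array : List Int) (out : Int) : Decidable (Spec_turn_dice dice_array out) := by unfold Spec_turn_dice; infer_instance

-- ===== CLAIM (what is proved, stated in full; the proofs are below) =====
def Claim_equal_turn_dice : Prop := ∀ (dice_array : List Int), Dom_turn_dice dice_array → Spec_turn_dice dice_array (turn_dice dice_array)

-- ===== LEMMAS AND PROOFS =====

-- A's selection key: count(x) - count(7 - x)
def pvKey (l : List Int) (x : Int) : Int := (l.count x : Int) - (l.count (7 - x) : Int)

theorem pvFace_getD (l : List Int) (v : Int) : (pvFace l).getD v 0 = (l.count v : Int) := by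
  unfold pvFace
  rw [PySem.Dict.getD_foldl_modify_add_one]
  have h0 : pvFace0.getD v 0 = 0 := by
    show ((((((PySem.Dict.empty.insert (1:Int) (0:Int)).insert 2 0).insert 3 0).insert 4 0).insert 5 0).insert 6 0).getD v 0 = 0
    simp only [PySem.Dict.getD_insert, PySem.Dict.getD_empty]
    split_ifs <;> rfl
  rw [h0]; ring

theorem pvRatio_items (l : List Int) :
    (pvRatio l).items = ([1, 2, 3, 4, 5, 6] : List Int).map (fun x => (x, pvKey l x)) := by
  have h : (pvRatio l).items
      = [((1:Int), (pvFace l).getD 1 0 - (pvFace l).getD 6 0),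
         (2, (pvFace l).getD 2 0 - (pvFace l).getD 5 0),
         (3, (pvFace l).getD 3 0 - (pvFace l).getD 4 0),
         (4, (pvFace l).getD 4 0 - (pvFace l).getD 3 0),
         (5, (pvFace l).getD 5 0 - (pvFace l).getD 2 0),
         (6, (pvFace l).getD 6 0 - (pvFace l).getD 1 0)] := rfl
  rw [h]
  simp only [pvFace_getD, List.map, pvKey]
  norm_num

-- the step function of PySem.List.max?'s foldl
def pvStep {A K : Type} [LT K] [DecidableLT K] (key : A -> K) (acc : Option A) (x : A) : Option A :=
  match acc with
  | none => some x
  | some m => if key m < key x then some x else some m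

theorem pv_max?_eq_foldl {A K : Type} [LT K] [DecidableLT K] (xs : List A) (key : A -> K) :
    PySem.List.max? xs key = xs.foldl (pvStep key) none := rfl

-- max? over (x, g x) pairs keyed by the second component selects the same index as max? keyed by g
theorem pv_foldl_pair (g : Int -> Int) (xs : List Int) (acc : Option Int) :
    (xs.map (fun x => (x, g x))).foldl (pvStep (fun p => p.2)) (acc.map (fun x => (x, g x)))
    = (xs.foldl (pvStep g) acc).map (fun x => (x, g x)) := by
  induction xs generalizing acc with
  | nil => rfl
  | cons y ys ih =>
    cases acc with
    | none => exact ih (some y)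
    | some m =>
      simp only [List.map, List.foldl, pvStep, Option.map]
      by_cases hc : g m < g y
      · simp only [if_pos hc]; simpa [Option.map] using ih (some y)
      · simp only [if_neg hc]; simpa [Option.map] using ih (some m)

theorem pv_max?_pair (g : Int -> Int) (xs : List Int) :
    PySem.List.max? (xs.map (fun x => (x, g x))) (fun p => p.2)
    = (PySem.List.max? xs g).map (fun x => (x, g x)) := by
  rw [pv_max?_eq_foldl, pv_max?_eq_foldl]
  simpa using pv_foldl_pair g xs none

-- A's final per-die loop in closed form (7 - t = t has no integer solution, so no side condition)
theorem pv_loopA (t : Int) (l : List Int) (a : Int) :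
    l.foldl (fun turns die => if die = 7 - t then turns + 2 else if die ≠ t then turns + 1 else turns) a
    = a + (l.length : Int) - (l.count t : Int) + (l.count (7 - t) : Int) := by
  induction l generalizing a with
  | nil => simp
  | cons d ds ih =>
    rw [List.foldl_cons, ih]
    simp only [List.count_cons, List.length_cons, beq_iff_eq, ne_eq]
    split_ifs <;> push_cast <;> omega

-- B's per-face cost loop in closed form
theorem pv_cost_closed (l : List Int) (x : Int) :
    pvCost l x = (l.length : Int) - (l.count x : Int) + (l.count (7 - x) : Int) := by
  unfold pvCost
  suffices H : ∀ a : Int, l.foldl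
      (fun s die => if die ≠ x then s + (if die = 7 - x then 2 else 1) else s) a
      = a + (l.length : Int) - (l.count x : Int) + (l.count (7 - x) : Int) by
    simpa using H 0
  induction l with
  | nil => intro a; simp
  | cons d ds ih =>
    intro a
    rw [List.foldl_cons, ih]
    simp only [List.count_cons, List.length_cons, beq_iff_eq, ne_eq]
    split_ifs <;> push_cast <;> omega

theorem pv_main (l : List Int) : turn_dice l = turn_dice_alt l := by
  -- the face A selects
  obtain ⟨m, hm⟩ : ∃ m, PySem.List.max? ([1, 2, 3, 4, 5, 6] : List Int) (pvKey l) = some m := by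
    cases hh : PySem.List.max? ([1, 2, 3, 4, 5, 6] : List Int) (pvKey l) with
    | none => exact absurd ((PySem.List.max?_eq_none_iff _ _).mp hh) (by simp)
    | some m => exact ⟨m, rfl⟩
  have hmem : m ∈ ([1, 2, 3, 4, 5, 6] : List Int) := PySem.List.max?_mem hm
  have hmax : ∀ y ∈ ([1, 2, 3, 4, 5, 6] : List Int), pvKey l y ≤ pvKey l m :=
    PySem.List.max?_isMax hm
  have hTurn : pvTurnTo l = (m, pvKey l m) := by
    unfold pvTurnTo
    rw [pvRatio_items, pv_max?_pair, hm]; rfl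
  have hA : turn_dice l = (l.length : Int) - (l.count m : Int) + (l.count (7 - m) : Int) := by
    unfold turn_dice
    rw [hTurn]
    simpa using pv_loopA m l 0
  -- B's minimum
  have hcosts : (PySem.List.pyRange 1 7 1).map (pvCost l)
      = ([1, 2, 3, 4, 5, 6] : List Int).map (pvCost l) := rfl
  obtain ⟨r, hr⟩ : ∃ r, PySem.List.min? (([1, 2, 3, 4, 5, 6] : List Int).map (pvCost l)) (fun v => v) = some r := by
    cases hh : PySem.List.min? (([1, 2, 3, 4, 5, 6] : List Int).map (pvCost l)) (fun v => v) with
    | none => exact absurd ((PySem.List.min?_eq_none_iff _ _).mp hh) (by simp)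
    | some r => exact ⟨r, rfl⟩
  have hB : turn_dice_alt l = r := by
    unfold turn_dice_alt
    rw [hcosts, hr]; rfl
  -- r is a member cost and is ≤ every cost, in particular ≤ cost m; and cost m ≤ every cost
  have hrmem : r ∈ ([1, 2, 3, 4, 5, 6] : List Int).map (pvCost l) := PySem.List.min?_mem hr
  have hrmin : ∀ y ∈ ([1, 2, 3, 4, 5, 6] : List Int).map (pvCost l), r ≤ y := by
    have := PySem.List.min?_isMin hr
    simpa using this
  obtain ⟨j, hj, hjr⟩ := List.mem_map.mp hrmem
  have h1 : r ≤ pvCost l m := hrmin _ (List.mem_map.mpr ⟨m, hmem, rfl⟩)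
  have h2 : pvCost l m ≤ r := by
    rw [← hjr, pv_cost_closed, pv_cost_closed]
    have := hmax j hj
    unfold pvKey at this
    omega
  have : r = pvCost l m := le_antisymm h1 h2
  rw [hA, hB, this, pv_cost_closed]

-- ===== VERDICT (by name: the statement is the Claim_ definition above) =====
theorem turn_dice_spec : Claim_equal_turn_dice := by
  intro dice_array _
  unfold Spec_turn_dice
  exact pv_main dice_array
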